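-- pv_equiv track=rewrite | github.com/codeuntilcold/asm1-intro-to-ai | problem.py | get_goal_points
-- ===== SOURCE A (Python) =====
-- def get_goal_points(board):
--     x_goal, y_goal, index_board_row, index_board_col = -1, -1, -1, -1
--     for rowBoard in board:
--         index_board_row += 1
--         for elementBoard in rowBoard:
--             index_board_col += 1
--
--             if elementBoard == "G":
--                 x_goal = index_board_row
--                 y_goal = index_board_col
--
--         index_board_col = -1
--
--     return x_goal, y_goal
-- ===== SOURCE B (Python) =====
-- def get_goal_points(board):
--     for i in range(len(board) - 1, -1, -1):
--         row = board[i]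
--         for j in range(len(row) - 1, -1, -1):
--             if row[j] == "G":
--                 return (i, j)
--     return (-1, -1)
-- ===== Notes on version B (the rewrite author's own statement) =====
-- stated objective: simpler
-- what changed: Instead of scanning forward while overwriting an accumulator pair, B scans the board backwards (last row first, last column first) and returns the first 'G' it meets, with no maintained state; (-1,-1) if none.
import Mathlib
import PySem

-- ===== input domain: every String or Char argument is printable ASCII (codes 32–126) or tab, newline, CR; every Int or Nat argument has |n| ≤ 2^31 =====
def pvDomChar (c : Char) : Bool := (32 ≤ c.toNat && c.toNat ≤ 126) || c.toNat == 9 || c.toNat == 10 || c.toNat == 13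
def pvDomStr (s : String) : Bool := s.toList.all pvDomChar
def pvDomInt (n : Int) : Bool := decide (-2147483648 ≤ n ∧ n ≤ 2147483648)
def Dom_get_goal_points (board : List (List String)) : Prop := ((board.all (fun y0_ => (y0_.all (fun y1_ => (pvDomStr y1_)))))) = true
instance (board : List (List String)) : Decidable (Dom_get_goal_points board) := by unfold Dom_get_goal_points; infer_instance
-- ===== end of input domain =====

-- B replaces A's forward overwrite-accumulator scan by a backwards scan returning the first 'G' met (simpler, no state).

-- ===== PORT A =====
-- inner 'for elementBoard in rowBoard' loop of A: state (x_goal, y_goal, index_board_col)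
def pvInnerA (ri : Int) (st : Int × Int × Int) (row : List String) : Int × Int × Int :=
  row.foldl (fun st2 e =>
    let ci := st2.2.2 + 1
    if e == "G" then (ri, ci, ci) else (st2.1, st2.2.1, ci)) st

def get_goal_points (board : List (List String)) : Int × Int :=
  let s := board.foldl (fun (st : Int × Int × Int × Int) rowBoard =>
    let ri := st.2.2.1 + 1
    let t := pvInnerA ri (st.1, st.2.1, st.2.2.2) rowBoard
    (t.1, t.2.1, ri, -1)) (-1, -1, -1, -1)
  (s.1, s.2.1)

-- ===== PORT B =====
-- index of the last "G" in a row, scanning from the right (tail first)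
def pvLastG : List String → Option Nat
  | [] => none
  | e :: rest =>
    match pvLastG rest with
    | some k => some (k + 1)
    | none => if e == "G" then some 0 else none

-- scan rows from the last one backwards (tail first), returning on the first row that has a G
def pvFindB : List (List String) → Option (Nat × Nat)
  | [] => none
  | r :: rest =>
    match pvFindB rest with
    | some (i, j) => some (i + 1, j)
    | none =>
      match pvLastG r with
      | some j => some (0, j)
      | none => none

def get_goal_points_alt (board : List (List String)) : Int × Int :=
  match pvFindB board with
  | some (i, j) => ((i : Int), (j : Int))
  | none => (-1, -1)

-- ===== PRECONDITION & SPEC =====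
def Spec_get_goal_points (board : List (List String)) (out : Int × Int) : Prop := out = get_goal_points_alt board
instance (board : List (List String)) (out : Int × Int) : Decidable (Spec_get_goal_points board out) := by unfold Spec_get_goal_points; infer_instance

-- ===== CLAIM (what is proved, stated in full; the proofs are below) =====
def Claim_equal_get_goal_points : Prop := ∀ (board : List (List String)), Dom_get_goal_points board → Spec_get_goal_points board (get_goal_points board)

-- ===== LEMMAS AND PROOFS =====
lemma pvInnerA_eq (ri : Int) (row : List String) : ∀ (x y ci : Int),
    pvInnerA ri (x, y, ci) row =
      (match pvLastG row with
       | some k => (ri, ci + 1 + (k : Int), ci + (row.length : Int))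
       | none => (x, y, ci + (row.length : Int))) := by
  induction row with
  | nil => intro x y ci; simp [pvInnerA, pvLastG]
  | cons e rest ih =>
    intro x y ci
    simp only [pvInnerA, List.foldl_cons] at *
    by_cases h : e == "G" <;> simp only [h, if_true] <;>
      rw [ih] <;> cases hg : pvLastG rest <;>
      simp [pvLastG, hg, h, Prod.ext_iff] <;> omega

lemma pvOuterA_eq (board : List (List String)) : ∀ (x y ri : Int),
    board.foldl (fun (st : Int × Int × Int × Int) rowBoard =>
      let r := st.2.2.1 + 1
      let t := pvInnerA r (st.1, st.2.1, st.2.2.2) rowBoard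
      (t.1, t.2.1, r, -1)) (x, y, ri, -1) =
      (match pvFindB board with
       | some (i, j) => (ri + 1 + (i : Int), (j : Int), ri + (board.length : Int), -1)
       | none => (x, y, ri + (board.length : Int), -1)) := by
  induction board with
  | nil => intro x y ri; simp [pvFindB]
  | cons r rest ih =>
    intro x y ri
    simp only [List.foldl_cons]
    rw [show (pvInnerA (ri + 1) (x, y, (-1 : Int)) r) =
        (match pvLastG r with
         | some k => (ri + 1, (-1 : Int) + 1 + (k : Int), -1 + (r.length : Int))
         | none => (x, y, -1 + (r.length : Int))) from pvInnerA_eq (ri+1) r x y (-1)]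
    cases hg : pvLastG r <;>
      simp only [] <;> rw [ih] <;> cases hf : pvFindB rest <;>
      simp [pvFindB, hf, hg, Prod.ext_iff] <;> omega

-- ===== VERDICT (by name: the statement is the Claim_ definition above) =====
theorem get_goal_points_spec : Claim_equal_get_goal_points := by
  intro board _
  unfold Spec_get_goal_points get_goal_points get_goal_points_alt
  rw [pvOuterA_eq board (-1) (-1) (-1)]
  cases hf : pvFindB board with
  | none => simp
  | some p => cases p with | mk i j => simp
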